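-- pv_equiv track=rewrite | github.com/iotbc-boun/bal | simulation/random_topology_generator.py | graph_to_str
-- ===== SOURCE A (Python) =====
-- import math
--
-- def graph_to_str(adj_matrix):
--     str_matrix = []
--     v = int(math.sqrt(len(adj_matrix)))
--     for i in range (1, v):
--         for j in range(i+1, v+1):
--             index = ( i - 1 ) * v + j - 1
--             if adj_matrix[ index ]:
--                 str_matrix.append(str(i) + " " + str(j) + " " + str(adj_matrix[index]))
--     return str_matrix
-- ===== SOURCE B (Python) =====
-- import math
--
-- def graph_to_str(adj_matrix):
--     v = int(math.sqrt(len(adj_matrix)))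
--     str_matrix = []
--     for index, val in enumerate(adj_matrix):
--         r, c = divmod(index, v)
--         if c > r and val:
--             str_matrix.append(str(r + 1) + " " + str(c + 1) + " " + str(val))
--     return str_matrix
-- ===== Notes on version B (the rewrite author's own statement) =====
-- stated objective: alternative
-- what changed: replaces the nested i/j row/column loops that build each flat index with a single flat enumerate pass that recovers (row, col) from the index via divmod and keeps only the strict upper triangle
import Mathlib
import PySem

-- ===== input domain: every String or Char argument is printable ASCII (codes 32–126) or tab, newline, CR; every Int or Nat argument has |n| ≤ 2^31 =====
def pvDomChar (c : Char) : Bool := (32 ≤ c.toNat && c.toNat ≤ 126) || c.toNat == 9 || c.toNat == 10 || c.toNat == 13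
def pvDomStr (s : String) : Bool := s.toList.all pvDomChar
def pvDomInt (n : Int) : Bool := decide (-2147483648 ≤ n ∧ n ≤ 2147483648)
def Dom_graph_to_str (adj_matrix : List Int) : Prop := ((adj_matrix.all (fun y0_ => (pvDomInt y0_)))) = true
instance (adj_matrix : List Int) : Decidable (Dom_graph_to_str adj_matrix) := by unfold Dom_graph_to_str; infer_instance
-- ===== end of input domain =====

-- B replaces A's nested i/j loops (which rebuild each flat index) by a single enumerate pass that
-- recovers (row, col) from the flat index with divmod — an alternative decomposition, same cost.

-- ===== PORT A =====
def graph_to_str (adj_matrix : List Int) : List String :=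
  let v : Int := (Nat.sqrt adj_matrix.length : Int)
  (PySem.List.pyRange 1 v).foldl (fun acc i =>
    (PySem.List.pyRange (i + 1) (v + 1)).foldl (fun acc j =>
      if PySem.List.pyGetD adj_matrix ((i - 1) * v + j - 1) 0 ≠ 0 then
        acc ++ [PySem.Int.toStr i ++ " " ++ PySem.Int.toStr j ++ " " ++
                PySem.Int.toStr (PySem.List.pyGetD adj_matrix ((i - 1) * v + j - 1) 0)]
      else acc) acc) []

-- ===== PORT B =====
def graph_to_str_alt (adj_matrix : List Int) : List String :=
  let v : Int := (Nat.sqrt adj_matrix.length : Int)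
  (PySem.List.enumerate adj_matrix).foldl (fun acc (p : Int × Int) =>
    match PySem.Int.divmod? p.1 v with
    | none => acc
    | some rc =>
      if rc.1 < rc.2 ∧ p.2 ≠ 0 then
        acc ++ [PySem.Int.toStr (rc.1 + 1) ++ " " ++ PySem.Int.toStr (rc.2 + 1) ++ " " ++
                PySem.Int.toStr p.2]
      else acc) []


-- ===== PRECONDITION & SPEC =====
def Spec_graph_to_str (adj_matrix : List Int) (out : List String) : Prop := out = graph_to_str_alt adj_matrix
instance (adj_matrix : List Int) (out : List String) : Decidable (Spec_graph_to_str adj_matrix out) := by unfold Spec_graph_to_str; infer_instance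

-- ===== CLAIM (what is proved, stated in full; the proofs are below) =====
def Claim_equal_graph_to_str : Prop := ∀ (adj_matrix : List Int), Dom_graph_to_str adj_matrix → Spec_graph_to_str adj_matrix (graph_to_str adj_matrix)

-- ===== LEMMAS AND PROOFS =====

def pvH (xs : List Int) (v k : Nat) : List String :=
  if k / v < k % v ∧ xs.getD k 0 ≠ 0 then
    [PySem.Int.toStr ((k / v + 1 : Nat) : Int) ++ " " ++ PySem.Int.toStr ((k % v + 1 : Nat) : Int) ++ " " ++
     PySem.Int.toStr (xs.getD k 0)]
  else []

def pvRow (xs : List Int) (v r : Nat) : List String :=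
  (List.range v).flatMap (fun c => pvH xs v (v * r + c))

theorem pvPull {c : Prop} [Decidable c] (acc l : List String) :
    (if c then acc ++ l else acc) = acc ++ (if c then l else []) := by
  split <;> simp

theorem pvZipFlat (xs : List Int) (m : Int) (G : Int × Int → List String) :
    (PySem.List.enumerate xs m).flatMap G
      = (List.range xs.length).flatMap (fun (k : Nat) => G (m + (k : Int), xs.getD k 0)) := by
  induction xs generalizing m with
  | nil => rfl
  | cons a xs ih =>
    simp only [PySem.List.enumerate, List.flatMap_cons, ih (m + 1), List.length_cons,
      List.range_succ_eq_map]
    congr 1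
    · simp
    rw [List.flatMap_map]
    apply List.flatMap_congr; intro k _
    have h : m + 1 + (k : Int) = m + ((k : Int) + 1) := by omega
    simp [Nat.succ_eq_add_one, h]

theorem pvRangeCast (a b : Nat) :
    PySem.List.pyRange (a : Int) (b : Int) = (List.range (b - a)).map (fun k => ((a + k : Nat) : Int)) := by
  rw [PySem.List.pyRange_of_pos _ _ (by norm_num : (0:Int) < 1)]
  by_cases h : (a : Int) < (b : Int)
  · have h1 : (((b : Int) - a + 1 - 1) / 1).toNat = b - a := by omega
    simp only [h, if_pos, h1]
    apply List.map_congr_left; intro k _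
    push_cast; ring
  · have hba : b - a = 0 := by omega
    simp [h, hba]

theorem pvB (xs : List Int) (hv : 0 < Nat.sqrt xs.length) :
    graph_to_str_alt xs = (List.range xs.length).flatMap (pvH xs (Nat.sqrt xs.length)) := by
  have hvz : ((Nat.sqrt xs.length : Nat) : Int) ≠ 0 := by positivity
  simp only [graph_to_str_alt, PySem.Int.divmod?, hvz, if_false, pvPull]
  rw [PySem.List.foldl_append_eq_flatMap, List.nil_append, pvZipFlat xs 0]
  apply List.flatMap_congr; intro k _
  simp only [pvH, zero_add, ← Int.ofNat_fdiv, ← Int.ofNat_fmod, Nat.cast_lt, ne_eq]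
  split_ifs with h1
  · push_cast; ring_nf
  · rfl

theorem pvArow (xs : List Int) (v r : Nat) (hr : r < v - 1) :
    (PySem.List.pyRange (((1 + r : Nat) : Int) + 1) (((v : Nat) : Int) + 1)).flatMap
      (fun j => if PySem.List.pyGetD xs ((((1 + r : Nat) : Int) - 1) * ((v : Nat) : Int) + j - 1) 0 ≠ 0 then
        [PySem.Int.toStr ((1 + r : Nat) : Int) ++ " " ++ PySem.Int.toStr j ++ " " ++
         PySem.Int.toStr (PySem.List.pyGetD xs ((((1 + r : Nat) : Int) - 1) * ((v : Nat) : Int) + j - 1) 0)]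
      else [])
    = pvRow xs v r := by
  have hv2 : r + 2 ≤ v := by omega
  have h1 : ((1 + r : Nat) : Int) + 1 = ((r + 2 : Nat) : Int) := by push_cast; ring
  have h2 : ((v : Nat) : Int) + 1 = ((v + 1 : Nat) : Int) := by push_cast; ring
  rw [h1, h2, pvRangeCast (r + 2) (v + 1), List.flatMap_map]
  unfold pvRow
  rw [show List.range v = List.range (r + 1) ++ (List.range (v - (r + 1))).map (fun x => (r + 1) + x) from by
    rw [← List.range_add]; congr 1; omega]
  rw [List.flatMap_append, List.flatMap_map]
  have hzero : (List.range (r + 1)).flatMap (fun c => pvH xs v (v * r + c)) = [] := by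
    apply List.flatMap_eq_nil_iff.mpr
    intro c hc
    have hc' : c ≤ r := by have := List.mem_range.mp hc; omega
    have hcv : c < v := by omega
    unfold pvH
    rw [if_neg]
    rintro ⟨hlt, -⟩
    rw [Nat.mul_add_div (by omega), Nat.div_eq_of_lt hcv, Nat.mul_add_mod, Nat.mod_eq_of_lt hcv] at hlt
    omega
  rw [hzero, List.nil_append]
  rw [show v + 1 - (r + 2) = v - (r + 1) by omega]
  apply List.flatMap_congr; intro k hk
  have hkv : r + 1 + k < v := by have := List.mem_range.mp hk; omega
  have hidx : (((1 + r : Nat) : Int) - 1) * ((v : Nat) : Int) + ((r + 2 + k : Nat) : Int) - 1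
      = ((v * r + (r + 1 + k) : Nat) : Int) := by push_cast; ring
  rw [hidx, PySem.List.pyGetD_natCast]
  have hdiv : (v * r + (r + 1 + k)) / v = r := by
    rw [Nat.mul_add_div (by omega), Nat.div_eq_of_lt hkv]
    omega
  have hmod : (v * r + (r + 1 + k)) % v = r + 1 + k := by
    rw [Nat.mul_add_mod, Nat.mod_eq_of_lt hkv]
  unfold pvH
  rw [hdiv, hmod]
  have htr : r < r + 1 + k := by omega
  rw [show (1 : Nat) + r = r + 1 by omega, show r + 2 + k = r + 1 + k + 1 by omega]
  simp only [htr, true_and]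

theorem pvA (xs : List Int) :
    graph_to_str xs = (List.range (Nat.sqrt xs.length - 1)).flatMap (pvRow xs (Nat.sqrt xs.length)) := by
  have hrange1 : PySem.List.pyRange 1 ((Nat.sqrt xs.length : Nat) : Int)
      = (List.range (Nat.sqrt xs.length - 1)).map (fun k => ((1 + k : Nat) : Int)) := by
    have h := pvRangeCast 1 (Nat.sqrt xs.length); simpa using h
  simp only [graph_to_str, pvPull, PySem.List.foldl_append_eq_flatMap, List.nil_append]
  rw [hrange1, List.flatMap_map]
  apply List.flatMap_congr; intro k hk
  exact pvArow xs (Nat.sqrt xs.length) k (List.mem_range.mp hk)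

theorem pvRows (xs : List Int) (v r : Nat) :
    (List.range (r * v)).flatMap (pvH xs v) = (List.range r).flatMap (pvRow xs v) := by
  induction r with
  | zero => simp
  | succ r ih =>
    have hmul : (r + 1) * v = r * v + v := by ring
    rw [hmul, List.range_add, List.flatMap_append, ih, List.range_succ, List.flatMap_append,
      List.flatMap_map]
    congr 1
    simp only [List.flatMap_cons, List.flatMap_nil, List.append_nil, pvRow]
    apply List.flatMap_congr; intro c _
    congr 1; ring

theorem pvTrunc (xs : List Int) (n v : Nat) (hv : 0 < v) (hle : v * v ≤ n) :
    (List.range n).flatMap (pvH xs v) = (List.range (v * v)).flatMap (pvH xs v) := by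
  rw [show n = v * v + (n - v * v) by omega, List.range_add, List.flatMap_append, List.flatMap_map]
  have hnil : ∀ x ∈ List.range (n - v * v), pvH xs v (v * v + x) = [] := by
    intro x _
    unfold pvH
    rw [if_neg]
    rintro ⟨h1, -⟩
    have hdge : v ≤ (v * v + x) / v := by rw [Nat.le_div_iff_mul_le hv]; omega
    have hmlt : (v * v + x) % v < v := Nat.mod_lt _ hv
    omega
  rw [List.flatMap_eq_nil_iff.mpr hnil, List.append_nil]

theorem pvRowLast (xs : List Int) (v : Nat) (hv : 0 < v) :
    pvRow xs v (v - 1) = [] := by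
  apply List.flatMap_eq_nil_iff.mpr
  intro c hc
  have hc' : c < v := List.mem_range.mp hc
  unfold pvH
  rw [if_neg]
  rintro ⟨h1, -⟩
  rw [Nat.mul_add_div hv, Nat.div_eq_of_lt hc', Nat.mul_add_mod, Nat.mod_eq_of_lt hc'] at h1
  omega

theorem pvMainEq (xs : List Int) : graph_to_str xs = graph_to_str_alt xs := by
  by_cases hx : xs = []
  · subst hx; rfl
  · have hn : 0 < xs.length := List.length_pos_iff.mpr hx
    have hv : 0 < Nat.sqrt xs.length := Nat.sqrt_pos.mpr hn
    have hle : Nat.sqrt xs.length * Nat.sqrt xs.length ≤ xs.length := by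
      have h := Nat.sqrt_le' xs.length
      nlinarith
    calc graph_to_str xs
        = (List.range (Nat.sqrt xs.length - 1)).flatMap (pvRow xs (Nat.sqrt xs.length)) := pvA xs
      _ = (List.range (Nat.sqrt xs.length - 1)).flatMap (pvRow xs (Nat.sqrt xs.length))
            ++ pvRow xs (Nat.sqrt xs.length) (Nat.sqrt xs.length - 1) := by
          rw [pvRowLast xs _ hv, List.append_nil]
      _ = (List.range (Nat.sqrt xs.length - 1 + 1)).flatMap (pvRow xs (Nat.sqrt xs.length)) := by
          rw [List.range_succ, List.flatMap_append]
          simp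
      _ = (List.range (Nat.sqrt xs.length)).flatMap (pvRow xs (Nat.sqrt xs.length)) := by
          rw [show Nat.sqrt xs.length - 1 + 1 = Nat.sqrt xs.length by omega]
      _ = (List.range (Nat.sqrt xs.length * Nat.sqrt xs.length)).flatMap (pvH xs (Nat.sqrt xs.length)) :=
          (pvRows xs (Nat.sqrt xs.length) (Nat.sqrt xs.length)).symm
      _ = (List.range xs.length).flatMap (pvH xs (Nat.sqrt xs.length)) :=
          (pvTrunc xs xs.length (Nat.sqrt xs.length) hv hle).symm
      _ = graph_to_str_alt xs := (pvB xs hv).symm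

-- ===== VERDICT (by name: the statement is the Claim_ definition above) =====
theorem graph_to_str_spec : Claim_equal_graph_to_str := by
  intro adj_matrix _
  unfold Spec_graph_to_str
  exact pvMainEq adj_matrix
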